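-- pv_equiv track=rewrite | github.com/Gon-seung/BOJ | programmers/표현가능한이진트리.py | change_binary
-- ===== SOURCE A (Python) =====
-- def change_binary(num):
--     answer = ""
--     while num != 0:
--         answer = str(num % 2) + answer
--         num //= 2
--     tar_length = 1
--     while len(answer) + 1 > tar_length:
--         tar_length *= 2
--     while len(answer) + 1 != tar_length:
--         answer = "0" + answer
--     return answer
-- ===== SOURCE B (Python) =====
-- def change_binary(num):
--     # closed form: binary string via bin(), target length from bit_length, pad with zfill
--     s = '' if num == 0 else bin(num)[2:]
--     t = (1 << len(s).bit_length()) - 1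
--     return s.zfill(t)
-- ===== Notes on version B (the rewrite author's own statement) =====
-- stated objective: simpler
-- what changed: Replaces A's three while-loops (manual div/mod digit build, doubling search for the target power of two, char-by-char zero prepending) by a library binary conversion plus a closed-form target length from bit_length and a single zfill.
import Mathlib
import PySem

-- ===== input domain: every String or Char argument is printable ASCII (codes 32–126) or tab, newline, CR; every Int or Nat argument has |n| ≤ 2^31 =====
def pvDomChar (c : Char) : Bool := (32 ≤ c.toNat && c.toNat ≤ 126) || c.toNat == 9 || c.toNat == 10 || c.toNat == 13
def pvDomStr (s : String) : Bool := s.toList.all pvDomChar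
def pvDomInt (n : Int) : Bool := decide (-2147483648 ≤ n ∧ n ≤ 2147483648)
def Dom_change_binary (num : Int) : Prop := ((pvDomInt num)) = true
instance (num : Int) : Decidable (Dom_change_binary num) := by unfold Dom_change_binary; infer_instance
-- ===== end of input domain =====

-- B replaces A's three while-loops by a binary conversion, a closed-form target
-- length computed from the bit length, and a single zfill (objective: simpler).

-- ===== PORT A =====
-- while num != 0: answer = str(num % 2) + answer; num //= 2
-- (guard '0 < num' is a termination guard: in Python the loop diverges for num < 0,
--  which Pre_change_binary excludes; for num ≥ 0 the guard equals 'num != 0')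
def aLoop1 (num : Int) (ans : List Char) : List Char :=
  if h : 0 < num then
    aLoop1 (PySem.Int.floordiv num 2) ((PySem.Int.toStr (PySem.Int.mod num 2)).toList ++ ans)
  else ans
termination_by num.toNat
decreasing_by
  rw [PySem.Int.floordiv_eq_ediv_of_pos (by norm_num : (0:Int) < 2)]; omega

-- while len(answer) + 1 > tar_length: tar_length *= 2   (len1 = len(answer) + 1;
--  '0 < tar' is a termination guard, always true since tar starts at 1 and doubles)
def aLoop2 (len1 tar : Nat) : Nat :=
  if h : tar < len1 ∧ 0 < tar then aLoop2 len1 (tar * 2) else tar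
termination_by len1 - tar
decreasing_by omega

-- while len(answer) + 1 != tar_length: answer = "0" + answer
-- ('<' is a termination guard: on reachable states tar ≥ len(answer) + 1, so '<' = '≠')
def aLoop3 (ans : List Char) (tar : Nat) : List Char :=
  if h : ans.length + 1 < tar then aLoop3 ('0' :: ans) tar else ans
termination_by tar - ans.length
decreasing_by simp; omega

def change_binary (num : Int) : String :=
  let answer := aLoop1 num []
  let tar := aLoop2 (answer.length + 1) 1
  String.mk (aLoop3 answer tar)

-- ===== PORT B =====
-- hand-port of bin(n)[2:] (binary digits, most significant first); exact for 0 < n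
def bdigits (n : Nat) : List Char :=
  if h : n = 0 then [] else bdigits (n / 2) ++ [if n % 2 = 1 then '1' else '0']
termination_by n
decreasing_by omega

-- hand-port of Python int.bit_length(); exact for n ≥ 0
def bitLen (n : Nat) : Nat :=
  if h : n = 0 then 0 else bitLen (n / 2) + 1
termination_by n
decreasing_by omega

def change_binary_alt (num : Int) : String :=
  let s : List Char := if num = 0 then [] else bdigits num.toNat  -- bin(num)[2:]
  let t : Nat := 2 ^ bitLen s.length - 1                         -- (1 << bl) - 1
  String.mk (List.replicate (t - s.length) '0' ++ s)             -- s.zfill(t)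

-- ===== PRECONDITION & SPEC =====
-- Pre_ excludes negative num: there A's first loop never terminates (num //= 2 converges to -1).
def Pre_change_binary (num : Int) : Prop := 0 ≤ num
instance (num : Int) : Decidable (Pre_change_binary num) := by unfold Pre_change_binary; infer_instance
def pvWitness_change_binary : Int := (6)

def Spec_change_binary (num : Int) (out : String) : Prop := out = change_binary_alt num
instance (num : Int) (out : String) : Decidable (Spec_change_binary num out) := by unfold Spec_change_binary; infer_instance

-- ===== CLAIM (what is proved, stated in full; the proofs are below) =====
def Claim_equal_change_binary : Prop := ∀ (num : Int), Dom_change_binary num → Pre_change_binary num → Spec_change_binary num (change_binary num)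

-- ===== LEMMAS AND PROOFS =====

lemma toChars_zero : PySem.Int.toChars 0 = ['0'] := by decide
lemma toChars_one : PySem.Int.toChars 1 = ['1'] := by decide

lemma aLoop1_eq_bdigits (n : Nat) : ∀ ans : List Char, aLoop1 (n : Int) ans = bdigits n ++ ans := by
  induction n using Nat.strong_induction_on with
  | _ n ih =>
    intro ans
    by_cases h0 : n = 0
    · subst h0; rw [aLoop1, bdigits]; simp
    · rw [aLoop1, bdigits]
      have hpos : (0:Int) < (n:Int) := by exact_mod_cast Nat.pos_of_ne_zero h0
      rw [dif_pos hpos, dif_neg h0]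
      rw [show PySem.Int.floordiv (n:Int) 2 = ((n / 2 : Nat) : Int) from by
            exact_mod_cast PySem.Int.floordiv_natCast n 2,
          show PySem.Int.mod (n:Int) 2 = ((n % 2 : Nat) : Int) from by
            exact_mod_cast PySem.Int.mod_natCast n 2]
      rw [ih (n / 2) (by omega)]
      rcases Nat.mod_two_eq_zero_or_one n with h | h <;>
        simp [h, toChars_zero, toChars_one]

lemma lt_two_pow_bitLen (n : Nat) : n < 2 ^ bitLen n := by
  induction n using Nat.strong_induction_on with
  | _ n ih =>
    by_cases h0 : n = 0
    · subst h0; rw [bitLen]; simp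
    · rw [bitLen, dif_neg h0]
      have := ih (n / 2) (by omega)
      rw [pow_succ]; omega

lemma two_pow_bitLen_pred_le (n : Nat) (h : 0 < n) : 2 ^ (bitLen n - 1) ≤ n := by
  induction n using Nat.strong_induction_on with
  | _ n ih =>
    rw [bitLen, dif_neg (by omega : ¬ n = 0)]
    by_cases h2 : n / 2 = 0
    · have hb0 : bitLen 0 = 0 := by rw [bitLen]; simp
      simp [hb0, show n = 1 by omega]
    · have := ih (n / 2) (by omega) (by omega)
      have hb : 0 < bitLen (n / 2) := by
        rw [bitLen, dif_neg h2]; omega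
      rw [Nat.add_sub_cancel, show bitLen (n / 2) = bitLen (n / 2) - 1 + 1 by omega,
          pow_succ]
      omega

lemma aLoop2_eq (L : Nat) : ∀ j, j ≤ bitLen L → aLoop2 (L + 1) (2 ^ j) = 2 ^ bitLen L := by
  have key : ∀ k j, bitLen L - j ≤ k → j ≤ bitLen L → aLoop2 (L + 1) (2 ^ j) = 2 ^ bitLen L := by
    intro k
    induction k with
    | zero =>
      intro j hk hj
      have hj' : j = bitLen L := by omega
      subst hj'
      rw [aLoop2, dif_neg]
      have := lt_two_pow_bitLen L
      push_neg; intro hlt; omega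
    | succ k ihk =>
      intro j hk hj
      by_cases hcase : 2 ^ j < L + 1
      · have hjlt : j < bitLen L := by
          by_contra hge
          have heq : j = bitLen L := by omega
          subst heq
          have := lt_two_pow_bitLen L
          omega
        rw [aLoop2, dif_pos ⟨hcase, pow_pos (by omega : (0:Nat) < 2) j⟩]
        rw [show 2 ^ j * 2 = 2 ^ (j + 1) from (pow_succ 2 j).symm]
        exact ihk (j + 1) (by omega) (by omega)
      · -- 2^j ≥ L+1 : loop stops; need 2^j = 2^(bitLen L), i.e. j = bitLen L
        have hj' : j = bitLen L := by
          by_contra hne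
          have hjlt : j < bitLen L := by omega
          have hle : 2 ^ j ≤ L := by
            calc 2 ^ j ≤ 2 ^ (bitLen L - 1) := Nat.pow_le_pow_right (by omega) (by omega)
            _ ≤ L := two_pow_bitLen_pred_le L (by
                  rcases Nat.eq_zero_or_pos L with h | h
                  · exfalso; subst h; rw [bitLen] at hjlt; simp at hjlt
                  · exact h)
          omega
        subst hj'
        rw [aLoop2, dif_neg]
        push_neg; intro hlt; omega
  intro j hj; exact key (bitLen L) j (by omega) hj

lemma aLoop3_pad (k : Nat) : ∀ ans : List Char, aLoop3 ans (ans.length + 1 + k) = List.replicate k '0' ++ ans := by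
  induction k with
  | zero => intro ans; rw [aLoop3, dif_neg (by omega)]; simp
  | succ k ih =>
    intro ans
    rw [aLoop3, dif_pos (by omega)]
    have h := ih ('0' :: ans)
    simp only [List.length_cons] at h
    rw [show ans.length + 1 + (k + 1) = ans.length + 1 + 1 + k by omega, h]
    rw [show List.replicate (k + 1) '0' = List.replicate k '0' ++ ['0'] from List.replicate_succ' ..]
    simp

-- ===== VERDICT (by name: the statement is the Claim_ definition above) =====
theorem change_binary_spec : Claim_equal_change_binary := by
  intro num _ hpre
  have h0 : 0 ≤ num := hpre
  unfold Spec_change_binary change_binary change_binary_alt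
  obtain ⟨n, rfl⟩ : ∃ n : Nat, num = (n : Int) := ⟨num.toNat, by omega⟩
  have hans : aLoop1 (n : Int) [] = bdigits n := by
    simpa using aLoop1_eq_bdigits n []
  have hs : (if (n:Int) = 0 then ([] : List Char) else bdigits ((n:Int)).toNat) = bdigits n := by
    by_cases h0 : n = 0
    · subst h0; simp [bdigits]
    · rw [if_neg (by exact_mod_cast h0)]; simp
  simp only [hans, hs]
  set L := (bdigits n).length with hL
  have htar : aLoop2 (L + 1) 1 = 2 ^ bitLen L := by
    simpa using aLoop2_eq L 0 (by omega)
  have hlt : L < 2 ^ bitLen L := lt_two_pow_bitLen L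
  rw [htar]
  have hk : 2 ^ bitLen L = L + 1 + (2 ^ bitLen L - 1 - L) := by omega
  rw [hk, aLoop3_pad (2 ^ bitLen L - 1 - L) (bdigits n)]
  congr 3
  omega
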